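-- pv_equiv track=rewrite | github.com/nabarunr3/genomic-tools-gdspyt | repeats.py | get_file_repeat_units
-- ===== SOURCE A (Python) =====
-- def get_repeat_frequency(sequence, repeat_unit):
--     """This function returns the number of times a repeat unit occurs in a sequence."""
--
--     repeat_count = 0
--     #we start from the first position of the sequence and take out test windows corresponding to length of repeat unit.
--     repeat_len = len(repeat_unit)
--     seq_len = len(sequence)
--     i = 0
--     #we want slide the window till the last position in the sequence which can accomodate the windo
--     while (i <= (seq_len - repeat_len)):
--         test_window = sequence[i:(i + repeat_len)]
--         if test_window == repeat_unit:
--             repeat_count = repeat_count + 1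
--
--         i = i + 1
--
--     return repeat_count
--
-- def get_seq_repeat_info(sequence, n):
--     """This function gets a dictionary containing all subsequences of length n which occur repeatedly, that is, two times or more, in a sequence."""
--
--     sequence_repeats_dict = {}
--
--     #we start from the first position and extract the substrings of length l. We stop at the last last position minus the length of the repeat.
--     i = 0
--     seqlen = len(sequence)
--     while (i <= (seqlen - n)):
--         test_repeat_unit = sequence[i:(i + n)]
--         #now we get the frequency of this unit in our sequence
--         frequency = get_repeat_frequency(sequence, test_repeat_unit)
--         if (frequency > 1):
--             sequence_repeats_dict[test_repeat_unit] = frequency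
--
--         i = i + 1
--
--     return sequence_repeats_dict
--
-- def get_file_repeat_units(fasta_dict, n):
--     #dictionary storing the non-unique repeat information of the file by calling get_seq_repeat_info()
--     file_repeat_info = {}
--     for uid, sequence in fasta_dict.items():
--         file_repeat_info[uid] = get_seq_repeat_info(sequence, n)
--
--     #dictionary to store the times of occurance of each unique repeat unit in the file
--     file_unit_times_dict = {}
--     #to help us keep track of the unique repeat units
--     unit_list = []
--     for uid, sequence_repeat_info in file_repeat_info.items():
--         for repeat_unit, times in sequence_repeat_info.items():
--             if repeat_unit in unit_list:
--                 file_unit_times_dict[repeat_unit] = file_unit_times_dict[repeat_unit] + times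
--             else:
--                 file_unit_times_dict[repeat_unit] = times
--                 unit_list.append(repeat_unit)
--
--     return file_unit_times_dict
-- ===== SOURCE B (Python) =====
-- def get_file_repeat_units(fasta_dict, n):
--     totals = {}
--     for sequence in fasta_dict.values():
--         counts = {}
--         for i in range(len(sequence) - n + 1):
--             window = sequence[i:i + n]
--             counts[window] = counts.get(window, 0) + 1
--         for window, c in counts.items():
--             if c > 1:
--                 totals[window] = totals.get(window, 0) + c
--     return totals
-- ===== Notes on version B (the rewrite author's own statement) =====
-- stated objective: alternative
-- what changed: A recounts every window by rescanning the whole sequence (get_repeat_frequency) for each of its L windows; B makes one sliding-window pass per sequence into a counting dict, keeps the entries with count > 1, and aggregates across sequences with a dict.get lookup instead of a membership list.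
-- outside the precondition, e.g. on get_file_repeat_units({'s': 'aa'}, -1): A returns {'a': 2, '': 3}, B returns {'': 3}
import Mathlib
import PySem

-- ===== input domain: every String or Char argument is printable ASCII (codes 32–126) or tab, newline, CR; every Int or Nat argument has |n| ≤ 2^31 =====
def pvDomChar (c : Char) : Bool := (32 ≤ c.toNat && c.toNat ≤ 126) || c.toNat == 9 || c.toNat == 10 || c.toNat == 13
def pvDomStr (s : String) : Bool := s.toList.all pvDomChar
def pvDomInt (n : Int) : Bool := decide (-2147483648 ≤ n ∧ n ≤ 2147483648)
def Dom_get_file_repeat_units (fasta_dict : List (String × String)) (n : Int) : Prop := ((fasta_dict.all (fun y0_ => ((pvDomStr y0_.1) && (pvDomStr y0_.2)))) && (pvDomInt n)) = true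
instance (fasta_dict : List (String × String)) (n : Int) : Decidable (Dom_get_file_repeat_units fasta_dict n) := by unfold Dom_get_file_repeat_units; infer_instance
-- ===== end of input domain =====

-- B replaces A's per-window rescan of the whole sequence by one sliding-window counting pass
-- per sequence plus a dict-lookup aggregation; objective: alternative (fewer passes over each
-- sequence; a timing run did not consistently confirm a speed-up on the generated inputs).

-- ===== PORT A =====
-- 'while (i <= seq_len - repeat_len)' with i starting at 0 and 'i = i + 1' is the counted loop
-- for i in range(0, seq_len - repeat_len + 1); both whiles are ported as foldl over that range.
def get_repeat_frequency (sequence repeat_unit : String) : Int :=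
  let repeat_len := PySem.Str.len repeat_unit
  let seq_len := PySem.Str.len sequence
  (PySem.List.pyRange 0 (seq_len - repeat_len + 1) 1).foldl
    (fun repeat_count i =>
      let test_window := PySem.Str.slice sequence (some i) (some (i + repeat_len))
      if test_window == repeat_unit then repeat_count + 1 else repeat_count)
    0

def get_seq_repeat_info (sequence : String) (n : Int) : PySem.Dict String Int :=
  let seqlen := PySem.Str.len sequence
  (PySem.List.pyRange 0 (seqlen - n + 1) 1).foldl
    (fun d i =>
      let test_repeat_unit := PySem.Str.slice sequence (some i) (some (i + n))
      let frequency := get_repeat_frequency sequence test_repeat_unit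
      if frequency > 1 then d.insert test_repeat_unit frequency else d)
    PySem.Dict.empty

def get_file_repeat_units (fasta_dict : List (String × String)) (n : Int) : List (String × Int) :=
  let file_repeat_info : List (String × PySem.Dict String Int) :=
    fasta_dict.map (fun p => (p.1, get_seq_repeat_info p.2 n))
  (file_repeat_info.foldl
    (fun (st : PySem.Dict String Int × List String) p =>
      p.2.items.foldl
        (fun (st : PySem.Dict String Int × List String) q =>
          if st.2.contains q.1 then
            (st.1.insert q.1 (st.1.getD q.1 0 + q.2), st.2)
          else
            (st.1.insert q.1 q.2, st.2 ++ [q.1]))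
        st)
    (PySem.Dict.empty, ([] : List String))).1.items

-- ===== PORT B =====
def get_file_repeat_units_alt (fasta_dict : List (String × String)) (n : Int) : List (String × Int) :=
  (fasta_dict.foldl
    (fun (totals : PySem.Dict String Int) p =>
      let sequence := p.2
      let counts : PySem.Dict String Int :=
        (PySem.List.pyRange 0 (PySem.Str.len sequence - n + 1) 1).foldl
          (fun c i =>
            let window := PySem.Str.slice sequence (some i) (some (i + n))
            c.insert window (c.getD window 0 + 1))
          PySem.Dict.empty
      counts.items.foldl
        (fun totals q =>
          if q.2 > 1 then totals.insert q.1 (totals.getD q.1 0 + q.2) else totals)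
        totals)
    PySem.Dict.empty).items

-- ===== PRECONDITION & SPEC =====
-- Pre_ restricts to the natural domain of an n-gram length: it excludes n < 0 (on which A still
-- returns, but Python's negative-slice arithmetic there makes the extracted test windows and the
-- frequencies counted for them accidental artefacts of the slice expressions).
def Pre_get_file_repeat_units (fasta_dict : List (String × String)) (n : Int) : Prop := 0 ≤ n
instance (fasta_dict : List (String × String)) (n : Int) : Decidable (Pre_get_file_repeat_units fasta_dict n) := by unfold Pre_get_file_repeat_units; infer_instance

def pvWitness_get_file_repeat_units : (List (String × String)) × Int := ([("id1", "abab"), ("id2", "ababa")], 2)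

def Spec_get_file_repeat_units (fasta_dict : List (String × String)) (n : Int) (out : List (String × Int)) : Prop := out = get_file_repeat_units_alt fasta_dict n
instance (fasta_dict : List (String × String)) (n : Int) (out : List (String × Int)) : Decidable (Spec_get_file_repeat_units fasta_dict n out) := by unfold Spec_get_file_repeat_units; infer_instance

-- ===== CLAIM (what is proved, stated in full; the proofs are below) =====
def Claim_equal_get_file_repeat_units : Prop := ∀ (fasta_dict : List (String × String)) (n : Int), Dom_get_file_repeat_units fasta_dict n → Pre_get_file_repeat_units fasta_dict n → Spec_get_file_repeat_units fasta_dict n (get_file_repeat_units fasta_dict n)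

-- ===== LEMMAS AND PROOFS =====

def pvWins (s : String) (n : Int) : List String :=
  (PySem.List.pyRange 0 (PySem.Str.len s - n + 1) 1).map
    (fun i => PySem.Str.slice s (some i) (some (i + n)))

theorem pv_foldl_count (g : Int → String) (u : String) :
    ∀ (l : List Int) (c : Int),
      l.foldl (fun c i => if g i == u then c + 1 else c) c = c + (((l.map g).count u : ℕ) : Int) := by
  intro l
  induction l with
  | nil => intro c; simp
  | cons x xs ih =>
    intro c
    by_cases h : g x = u
    · simp only [List.foldl_cons, if_pos (by simp [h] : (g x == u) = true), ih,
        List.map_cons, List.count_cons, if_pos (by simp [h] : (u == g x) = true)]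
      push_cast; ring
    · simp only [List.foldl_cons, if_neg (by simp [h] : ¬ (g x == u) = true), ih,
        List.map_cons, List.count_cons, if_neg (by simp [Ne.symm h] : ¬ (u == g x) = true)]
      push_cast; ring

theorem pv_len_window (s : String) (n i : Int) (hn : 0 ≤ n) (hi : 0 ≤ i)
    (hle : i + n ≤ PySem.Str.len s) :
    PySem.Str.len (PySem.Str.slice s (some i) (some (i + n))) = n := by
  rw [PySem.Str.len_eq] at *
  rw [PySem.Str.toList_slice]
  simp only [PySem.Chars.slice_eq_listSlice, PySem.List.length_slice]
  simp only [PySem.List.clampIdx, if_neg (show ¬ (i + n < 0) by omega),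
    if_neg (show ¬ (i < 0) by omega)]
  omega

theorem pv_mem_wins_len (s : String) (n : Int) (hn : 0 ≤ n) (u : String) (hu : u ∈ pvWins s n) :
    PySem.Str.len u = n := by
  obtain ⟨i, hi, rfl⟩ := List.mem_map.mp hu
  have h := PySem.List.mem_pyRange_one.mp hi
  exact pv_len_window s n i hn h.1 (by omega)

theorem pv_grf_eq_count (s u : String) :
    get_repeat_frequency s u = (((pvWins s (PySem.Str.len u)).count u : ℕ) : Int) := by
  unfold get_repeat_frequency pvWins
  rw [pv_foldl_count (fun i => PySem.Str.slice s (some i) (some (i + PySem.Str.len u))) u]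
  simp

theorem pv_foldA_items (F : String → Int) (l : List String) :
    (l.foldl (fun d u => if F u > 1 then d.insert u (F u) else d) PySem.Dict.empty).items
      = ((PySem.Set.ofList l).filter (fun u => decide (F u > 1))).map (fun u => (u, F u)) := by
  induction l using List.reverseRecOn with
  | nil => rfl
  | append_singleton l x ih =>
    rw [List.foldl_append, List.foldl_cons, List.foldl_nil,
      PySem.Set.ofList_append_singleton, PySem.Set.add_eq_ite]
    set d := l.foldl (fun d u => if F u > 1 then d.insert u (F u) else d) PySem.Dict.empty with hd
    have hkeys : d.keys = ((PySem.Set.ofList l).filter (fun u => decide (F u > 1))) := by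
      show d.items.map (·.1) = _
      rw [ih, List.map_map]
      simp [Function.comp_def]
    have hcont : d.contains x = decide (x ∈ PySem.Set.ofList l ∧ F x > 1) := by
      rw [PySem.Dict.contains_eq_decide_mem_keys, hkeys]
      simp [List.mem_filter]
    by_cases hbig : F x > 1
    · by_cases hmem : x ∈ PySem.Set.ofList l
      · rw [if_pos hbig, if_pos hmem,
          PySem.Dict.items_insert_of_contains d (F x) (by rw [hcont]; simp [hmem, hbig]), ih]
        rw [List.map_map]
        apply List.map_congr_left
        intro u hu
        by_cases hux : u = x
        · simp [Function.comp, hux]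
        · simp [Function.comp, hux]
      · rw [if_pos hbig, if_neg hmem,
          PySem.Dict.items_insert_of_not_contains d (F x) (by rw [hcont]; simp [hmem]), ih,
          List.filter_append, List.map_append]
        simp [hbig]
    · rw [if_neg hbig, ih]
      by_cases hmem : x ∈ PySem.Set.ofList l
      · rw [if_pos hmem]
      · rw [if_neg hmem, List.filter_append]
        simp [hbig]

theorem pv_seq_items (s : String) (n : Int) (hn : 0 ≤ n) :
    (get_seq_repeat_info s n).items
      = ((PySem.Set.ofList (pvWins s n)).filter
            (fun u => decide ((((pvWins s n).count u : ℕ) : Int) > 1))).map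
          (fun u => (u, (((pvWins s n).count u : ℕ) : Int))) := by
  have key : (fun _ => get_seq_repeat_info s n) () = (pvWins s n).foldl
      (fun (d : PySem.Dict String Int) (u : String) =>
        if get_repeat_frequency s u > 1 then d.insert u (get_repeat_frequency s u) else d)
      PySem.Dict.empty := by
    unfold get_seq_repeat_info pvWins
    rw [List.foldl_map]
  rw [show get_seq_repeat_info s n = _ from key]
  rw [PySem.List.foldl_congr_mem (pvWins s n) _
    (fun (d : PySem.Dict String Int) (u : String) =>
      if (((pvWins s n).count u : ℕ) : Int) > 1
      then d.insert u (((pvWins s n).count u : ℕ) : Int) else d)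
    PySem.Dict.empty
    (by
      intro acc u hu
      rw [pv_grf_eq_count s u, pv_mem_wins_len s n hn u hu])]
  exact pv_foldA_items (fun u => (((pvWins s n).count u : ℕ) : Int)) (pvWins s n)

theorem pv_foldB_filter (l : List (String × Int)) (t : PySem.Dict String Int) :
    l.foldl (fun t q => if q.2 > 1 then t.insert q.1 (t.getD q.1 0 + q.2) else t) t
      = (l.filter (fun q => decide (q.2 > 1))).foldl
          (fun t q => t.insert q.1 (t.getD q.1 0 + q.2)) t := by
  induction l generalizing t with
  | nil => rfl
  | cons q l ih =>
    by_cases h : q.2 > 1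
    · simp [h, ih]
    · simp [h, ih]

theorem pv_inner (l : List (String × Int)) :
    ∀ (d : PySem.Dict String Int) (ul : List String), ul = d.keys →
      l.foldl
          (fun (st : PySem.Dict String Int × List String) q =>
            if st.2.contains q.1 then
              (st.1.insert q.1 (st.1.getD q.1 0 + q.2), st.2)
            else
              (st.1.insert q.1 q.2, st.2 ++ [q.1]))
          (d, ul)
        = (l.foldl (fun t q => t.insert q.1 (t.getD q.1 0 + q.2)) d,
           (l.foldl (fun t q => t.insert q.1 (t.getD q.1 0 + q.2)) d).keys) := by
  induction l with
  | nil => intro d ul h; simp [h]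
  | cons q l ih =>
    intro d ul h
    by_cases hc : d.contains q.1 = true
    · have hul : ul.contains q.1 = true := by
        rw [h]
        simpa using (PySem.Dict.contains_iff_mem_keys d q.1).mp hc
      rw [List.foldl_cons, List.foldl_cons]
      dsimp only
      rw [hul]
      simp only [if_true]
      exact ih _ _ (by rw [h, PySem.Dict.keys_insert_of_contains d _ hc])
    · have hc' : d.contains q.1 = false := by simpa using hc
      have hul : ul.contains q.1 = false := by
        rw [h]
        simpa using fun hm => hc ((PySem.Dict.contains_iff_mem_keys d q.1).mpr (by simpa using hm))
      rw [List.foldl_cons, List.foldl_cons]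
      dsimp only
      rw [hul]
      simp only [Bool.false_eq_true, if_false]
      rw [PySem.Dict.getD_of_not_contains d 0 hc', zero_add]
      exact ih _ _ (by rw [h, PySem.Dict.keys_insert_of_not_contains d _ hc'])

def pvBodyB (n : Int) : PySem.Dict String Int → (String × String) → PySem.Dict String Int :=
  fun totals p =>
    let sequence := p.2
    let counts : PySem.Dict String Int :=
      (PySem.List.pyRange 0 (PySem.Str.len sequence - n + 1) 1).foldl
        (fun c i =>
          let window := PySem.Str.slice sequence (some i) (some (i + n))
          c.insert window (c.getD window 0 + 1))
        PySem.Dict.empty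
    counts.items.foldl
      (fun totals q =>
        if q.2 > 1 then totals.insert q.1 (totals.getD q.1 0 + q.2) else totals)
      totals

theorem pv_counts_eq_counter (s : String) (n : Int) :
    (PySem.List.pyRange 0 (PySem.Str.len s - n + 1) 1).foldl
        (fun c i =>
          let window := PySem.Str.slice s (some i) (some (i + n))
          c.insert window (c.getD window 0 + 1))
        PySem.Dict.empty
      = PySem.Dict.counter (pvWins s n) := by
  rw [← PySem.Dict.foldl_insert_getD_add_one_eq_counter]
  unfold pvWins
  rw [List.foldl_map]

def pvBinner (n : Int) (s : String) (totals : PySem.Dict String Int) : PySem.Dict String Int :=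
  (PySem.Dict.counter (pvWins s n)).items.foldl
    (fun totals q =>
      if q.2 > 1 then totals.insert q.1 (totals.getD q.1 0 + q.2) else totals)
    totals

theorem pvBodyB_eq (n : Int) (t : PySem.Dict String Int) (p : String × String) :
    pvBodyB n t p = pvBinner n p.2 t := by
  show ((PySem.List.pyRange 0 (PySem.Str.len p.2 - n + 1) 1).foldl
      (fun c i =>
        let window := PySem.Str.slice p.2 (some i) (some (i + n))
        c.insert window (c.getD window 0 + 1))
      PySem.Dict.empty).items.foldl
      (fun totals q =>
        if q.2 > 1 then totals.insert q.1 (totals.getD q.1 0 + q.2) else totals)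
      t = pvBinner n p.2 t
  rw [pv_counts_eq_counter p.2 n]
  rfl

theorem pv_seq_fold (s : String) (n : Int) (hn : 0 ≤ n)
    (d : PySem.Dict String Int) (ul : List String) (h : ul = d.keys) :
    (get_seq_repeat_info s n).items.foldl
        (fun (st : PySem.Dict String Int × List String) q =>
          if st.2.contains q.1 then
            (st.1.insert q.1 (st.1.getD q.1 0 + q.2), st.2)
          else
            (st.1.insert q.1 q.2, st.2 ++ [q.1]))
        (d, ul)
      = (pvBinner n s d, (pvBinner n s d).keys) := by
  unfold pvBinner
  rw [pv_foldB_filter, PySem.Dict.items_counter, List.filter_map,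
    pv_seq_items s n hn]
  rw [show ((fun q => decide (q.2 > 1)) ∘ (fun k => (k, ((pvWins s n).count k : Int))))
      = (fun u => decide ((((pvWins s n).count u : Nat) : Int) > 1)) from rfl]
  exact pv_inner _ d ul h

theorem pv_outer (n : Int) (hn : 0 ≤ n) (fd : List (String × String)) :
    ∀ (d : PySem.Dict String Int) (ul : List String), ul = d.keys →
      fd.foldl
          (fun (st : PySem.Dict String Int × List String) p =>
            (get_seq_repeat_info p.2 n).items.foldl
              (fun (st : PySem.Dict String Int × List String) q =>
                if st.2.contains q.1 then
                  (st.1.insert q.1 (st.1.getD q.1 0 + q.2), st.2)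
                else
                  (st.1.insert q.1 q.2, st.2 ++ [q.1]))
              st)
          (d, ul)
        = (fd.foldl (pvBodyB n) d, (fd.foldl (pvBodyB n) d).keys) := by
  induction fd with
  | nil => intro d ul h; simp [h]
  | cons p fd ih =>
    intro d ul h
    rw [List.foldl_cons, List.foldl_cons]
    rw [pv_seq_fold p.2 n hn d ul h, ← pvBodyB_eq n d p]
    exact ih (pvBodyB n d p) (pvBodyB n d p).keys rfl

theorem pv_main (fd : List (String × String)) (n : Int) (hn : 0 ≤ n) :
    get_file_repeat_units fd n = get_file_repeat_units_alt fd n := by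
  show ((fd.map (fun p => (p.1, get_seq_repeat_info p.2 n))).foldl
      (fun (st : PySem.Dict String Int × List String) p =>
        p.2.items.foldl
          (fun (st : PySem.Dict String Int × List String) q =>
            if st.2.contains q.1 then
              (st.1.insert q.1 (st.1.getD q.1 0 + q.2), st.2)
            else
              (st.1.insert q.1 q.2, st.2 ++ [q.1]))
          st)
      (PySem.Dict.empty, ([] : List String))).1.items
    = (fd.foldl (pvBodyB n) PySem.Dict.empty).items
  rw [List.foldl_map]
  exact congrArg (fun st => st.1.items) (pv_outer n hn fd PySem.Dict.empty [] rfl)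

-- ===== VERDICT (by name: the statement is the Claim_ definition above) =====
theorem get_file_repeat_units_spec : Claim_equal_get_file_repeat_units := by
  intro fasta_dict n _ hpre
  exact pv_main fasta_dict n hpre
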